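-- pv_equiv track=rewrite | github.com/Ulri1277/Sceientific_Computing_Fall_2020 | Assigment2.py | CellNeighbours
-- ===== SOURCE A (Python) =====
-- def CellNeighbours(Current, Neighbours):
--     # Divide the Neighbours: Tree, Empty and Water into lists
--     TreeNeighbours = []
--     EmptyNeighbours = []
--     WaterNeighbours = []
--
--     # Loop there checks the type of object and sets it into the end of the list match to its type:
--     for neighbour in Neighbours:
--         if Current[neighbour]['Type'] == "Tree":
--             TreeNeighbours.append(neighbour)
--
--         elif Current[neighbour]['Type'] == "WaterSource":
--             WaterNeighbours.append(neighbour)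
--
--         else:
--             EmptyNeighbours.append(neighbour)
--
--     return TreeNeighbours, WaterNeighbours, EmptyNeighbours
-- ===== SOURCE B (Python) =====
-- def CellNeighbours(Current, Neighbours):
--     # Staged binary partitions instead of one three-way categorizing loop:
--     # first split off the trees, then split the remainder into water vs empty.
--     def split(names, t):
--         yes, no = [], []
--         for n in names:
--             (yes if Current[n]['Type'] == t else no).append(n)
--         return yes, no
--     trees, rest = split(Neighbours, "Tree")
--     waters, empties = split(rest, "WaterSource")
--     return trees, waters, empties
-- ===== Notes on version B (the rewrite author's own statement) =====
-- stated objective: alternative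
-- what changed: Replaces the single three-way categorizing loop with two staged binary partitions: split off the trees first, then split the remaining neighbours into water vs empty (the empty test never mentions 'Tree').
import Mathlib
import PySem

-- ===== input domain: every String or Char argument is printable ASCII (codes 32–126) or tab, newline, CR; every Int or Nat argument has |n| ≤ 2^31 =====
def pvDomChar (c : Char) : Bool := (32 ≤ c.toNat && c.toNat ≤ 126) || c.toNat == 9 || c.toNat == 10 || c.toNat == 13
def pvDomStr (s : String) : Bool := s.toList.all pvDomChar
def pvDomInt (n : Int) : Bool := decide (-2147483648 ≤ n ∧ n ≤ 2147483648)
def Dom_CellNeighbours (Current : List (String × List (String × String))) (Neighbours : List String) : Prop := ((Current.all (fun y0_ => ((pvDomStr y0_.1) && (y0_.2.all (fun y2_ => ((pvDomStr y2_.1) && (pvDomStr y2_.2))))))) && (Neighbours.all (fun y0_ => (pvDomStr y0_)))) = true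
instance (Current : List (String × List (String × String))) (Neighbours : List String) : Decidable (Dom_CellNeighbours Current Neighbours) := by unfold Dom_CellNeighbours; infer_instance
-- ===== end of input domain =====

-- B replaces A's single three-way categorizing loop by two staged binary partitions (alternative decomposition, same cost).


-- ===== PORT A =====
-- Current[neighbour]['Type']: first-match association-list lookup (dict); Pre_ guarantees both keys exist,
-- so the getD defaults are never reached on admitted inputs (in Python a missing key raises KeyError).
def pvTypeOf (Current : List (String × List (String × String))) (n : String) : String :=
  (((Current.lookup n).getD []).lookup "Type").getD ""

def CellNeighbours (Current : List (String × List (String × String))) (Neighbours : List String) : List String × List String × List String :=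
  Neighbours.foldl (fun (s : List String × List String × List String) neighbour =>
      if pvTypeOf Current neighbour == "Tree" then
        (s.1 ++ [neighbour], s.2.1, s.2.2)
      else if pvTypeOf Current neighbour == "WaterSource" then
        (s.1, s.2.1 ++ [neighbour], s.2.2)
      else
        (s.1, s.2.1, s.2.2 ++ [neighbour]))
    ([], [], [])

-- ===== PORT B =====
-- split(names, t): one binary partition pass appending to 'yes'/'no'.
def pvSplit (Current : List (String × List (String × String))) (names : List String) (t : String) : List String × List String :=
  names.foldl (fun (s : List String × List String) n =>
      if pvTypeOf Current n == t then (s.1 ++ [n], s.2) else (s.1, s.2 ++ [n]))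
    ([], [])

def CellNeighbours_alt (Current : List (String × List (String × String))) (Neighbours : List String) : List String × List String × List String :=
  let p1 := pvSplit Current Neighbours "Tree"
  let p2 := pvSplit Current p1.2 "WaterSource"
  (p1.1, p2.1, p2.2)

-- ===== PRECONDITION & SPEC =====
-- Pre_ excludes exactly the inputs on which Python raises KeyError: a neighbour missing from Current,
-- or whose cell dict has no 'Type' key.
def Pre_CellNeighbours (Current : List (String × List (String × String))) (Neighbours : List String) : Prop :=
  ∀ n ∈ Neighbours, ((Current.lookup n).bind (fun d => d.lookup "Type")).isSome = true
instance (Current : List (String × List (String × String))) (Neighbours : List String) : Decidable (Pre_CellNeighbours Current Neighbours) := by unfold Pre_CellNeighbours; infer_instance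

def pvWitness_CellNeighbours : (List (String × List (String × String))) × List String :=
  ([("x", [("Type", "Tree")]), ("y", [("Type", "WaterSource")]), ("z", [("Type", "Empty")])], ["x", "y", "z", "x"])

def Spec_CellNeighbours (Current : List (String × List (String × String))) (Neighbours : List String) (out : List String × List String × List String) : Prop := out = CellNeighbours_alt Current Neighbours
instance (Current : List (String × List (String × String))) (Neighbours : List String) (out : List String × List String × List String) : Decidable (Spec_CellNeighbours Current Neighbours out) := by unfold Spec_CellNeighbours; infer_instance

-- ===== CLAIM (what is proved, stated in full; the proofs are below) =====
def Claim_equal_CellNeighbours : Prop := ∀ (Current : List (String × List (String × String))) (Neighbours : List String), Dom_CellNeighbours Current Neighbours → Pre_CellNeighbours Current Neighbours → Spec_CellNeighbours Current Neighbours (CellNeighbours Current Neighbours)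

-- ===== LEMMAS AND PROOFS =====
-- B's partition pass computes the two filters of its predicate.
theorem pvSplit_eq_filters (Current : List (String × List (String × String)))
    (names : List String) (t : String) (y n0 : List String) :
    names.foldl (fun (s : List String × List String) n =>
      if pvTypeOf Current n == t then (s.1 ++ [n], s.2) else (s.1, s.2 ++ [n])) (y, n0)
    = (y ++ names.filter (fun n => pvTypeOf Current n == t),
       n0 ++ names.filter (fun n => !(pvTypeOf Current n == t))) := by
  induction names generalizing y n0 with
  | nil => simp
  | cons x xs ih =>
    cases h : (pvTypeOf Current x == t) with
    | true =>
      simp only [List.foldl_cons, List.filter_cons, h, if_true, Bool.not_true]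
      rw [ih]; simp
    | false =>
      simp only [List.foldl_cons, List.filter_cons, h, Bool.false_eq_true, if_false, Bool.not_false]
      rw [ih]; simp

-- A's fold with accumulator (t, w, e) appends exactly three filters of Neighbours.
theorem pvFold_eq_filters (Current : List (String × List (String × String)))
    (Neighbours : List String) (t w e : List String) :
    Neighbours.foldl (fun (s : List String × List String × List String) neighbour =>
      if pvTypeOf Current neighbour == "Tree" then
        (s.1 ++ [neighbour], s.2.1, s.2.2)
      else if pvTypeOf Current neighbour == "WaterSource" then
        (s.1, s.2.1 ++ [neighbour], s.2.2)
      else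
        (s.1, s.2.1, s.2.2 ++ [neighbour])) (t, w, e)
    = (t ++ Neighbours.filter (fun n => pvTypeOf Current n == "Tree"),
       w ++ Neighbours.filter (fun n => !(pvTypeOf Current n == "Tree") && pvTypeOf Current n == "WaterSource"),
       e ++ Neighbours.filter (fun n => !(pvTypeOf Current n == "Tree") && !(pvTypeOf Current n == "WaterSource"))) := by
  induction Neighbours generalizing t w e with
  | nil => simp
  | cons x xs ih =>
    cases h1 : (pvTypeOf Current x == "Tree") with
    | true =>
      simp only [List.foldl_cons, List.filter_cons, h1, if_true, Bool.not_true, Bool.false_and]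
      rw [ih]; simp
    | false =>
      cases h2 : (pvTypeOf Current x == "WaterSource") with
      | true =>
        simp only [List.foldl_cons, List.filter_cons, h1, h2, Bool.false_eq_true, if_false,
          if_true, Bool.not_false, Bool.true_and, Bool.not_true, Bool.and_false]
        rw [ih]; simp
      | false =>
        simp only [List.foldl_cons, List.filter_cons, h1, h2, Bool.false_eq_true, if_false,
          Bool.not_false, Bool.true_and]
        rw [ih]; simp

-- ===== VERDICT (by name: the statement is the Claim_ definition above) =====
theorem CellNeighbours_spec : Claim_equal_CellNeighbours := by
  intro Current Neighbours _ _
  unfold Spec_CellNeighbours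
  have hsplit : ∀ (names : List String) (t : String), pvSplit Current names t
      = (names.filter (fun n => pvTypeOf Current n == t),
         names.filter (fun n => !(pvTypeOf Current n == t))) := by
    intro names t
    unfold pvSplit
    rw [pvSplit_eq_filters]
    simp
  unfold CellNeighbours
  rw [pvFold_eq_filters]
  simp only [CellNeighbours_alt, hsplit, List.nil_append, List.filter_filter]
  refine congrArg _ (congrArg₂ _ ?_ ?_) <;>
    exact List.filter_congr (by intro n _; cases h1 : (pvTypeOf Current n == "Tree") <;>
      cases h2 : (pvTypeOf Current n == "WaterSource") <;> simp_all)
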